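-- pv_equiv track=rewrite | github.com/fAndreuzzi/third-octave | codice.py | fft_bucket
-- ===== SOURCE A (Python) =====
-- def fft_bucket(l, r, fft_frq):
--     indexes = []
--     for idx, f in enumerate(fft_frq):
--         if l <= f and f <= r:
--             indexes.append(idx)
--         if f > r:
--             break
--     return indexes
-- ===== SOURCE B (Python) =====
-- def fft_bucket(l, r, fft_frq):
--     # find the first position whose frequency exceeds r, then keep the
--     # indices of the prefix whose frequencies are at least l
--     cut = next((i for i, f in enumerate(fft_frq) if f > r), len(fft_frq))
--     return [i for i, f in enumerate(fft_frq[:cut]) if l <= f]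
-- ===== Notes on version B (the rewrite author's own statement) =====
-- stated objective: alternative
-- what changed: B first locates the cut point (first frequency exceeding r) and then filters the prefix by the lower bound only, instead of A's single loop that tests both bounds and breaks; since every element before the cut is <= r the upper-bound test disappears.
import Mathlib
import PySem

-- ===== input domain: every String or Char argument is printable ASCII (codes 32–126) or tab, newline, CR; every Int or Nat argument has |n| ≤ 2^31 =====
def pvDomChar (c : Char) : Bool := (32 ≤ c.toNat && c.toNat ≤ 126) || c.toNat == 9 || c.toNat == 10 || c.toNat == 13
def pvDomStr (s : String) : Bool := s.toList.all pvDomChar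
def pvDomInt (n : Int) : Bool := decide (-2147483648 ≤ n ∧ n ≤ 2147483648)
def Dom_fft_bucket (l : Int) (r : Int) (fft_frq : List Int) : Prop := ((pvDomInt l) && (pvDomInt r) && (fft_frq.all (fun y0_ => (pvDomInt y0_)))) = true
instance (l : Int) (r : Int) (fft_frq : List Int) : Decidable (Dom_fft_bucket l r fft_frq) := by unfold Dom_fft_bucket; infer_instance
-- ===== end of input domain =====

-- B locates the first frequency above r, then filters that prefix by the lower bound only; alternative decomposition, same cost.


-- ===== PORT A =====
-- the for-loop with `break`: append idx when l <= f <= r, stop after the first f > r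
def fftGoA (l : Int) (r : Int) (xs : List Int) (idx : Int) : List Int :=
  match xs with
  | [] => []
  | f :: rest =>
      let pre := if l ≤ f ∧ f ≤ r then [idx] else []
      if r < f then pre else pre ++ fftGoA l r rest (idx + 1)

def fft_bucket (l : Int) (r : Int) (fft_frq : List Int) : List Int :=
  fftGoA l r fft_frq 0

-- ===== PORT B =====
-- next((i for i, f in enumerate(fft_frq) if f > r), len(fft_frq))
def fftCut (r : Int) (xs : List Int) : Nat :=
  match xs with
  | [] => 0
  | f :: rest => if r < f then 0 else fftCut r rest + 1

-- [i for i, f in enumerate(fft_frq[:cut]) if l <= f]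
def fft_bucket_alt (l : Int) (r : Int) (fft_frq : List Int) : List Int :=
  let cut := fftCut r fft_frq
  ((PySem.List.enumerate (PySem.List.slice fft_frq none (some (cut : Int)))).filter
      (fun p => decide (l ≤ p.2))).map (·.1)

-- ===== PRECONDITION & SPEC =====
def Spec_fft_bucket (l : Int) (r : Int) (fft_frq : List Int) (out : List Int) : Prop := out = fft_bucket_alt l r fft_frq
instance (l : Int) (r : Int) (fft_frq : List Int) (out : List Int) : Decidable (Spec_fft_bucket l r fft_frq out) := by unfold Spec_fft_bucket; infer_instance

-- ===== CLAIM (what is proved, stated in full; the proofs are below) =====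
def Claim_equal_fft_bucket : Prop := ∀ (l : Int) (r : Int) (fft_frq : List Int), Dom_fft_bucket l r fft_frq → Spec_fft_bucket l r fft_frq (fft_bucket l r fft_frq)

-- ===== LEMMAS AND PROOFS =====
theorem fftGoA_eq (l r : Int) (xs : List Int) (idx : Int) :
    fftGoA l r xs idx =
      ((PySem.List.enumerate (xs.take (fftCut r xs)) idx).filter
        (fun p => decide (l ≤ p.2))).map (·.1) := by
  induction xs generalizing idx with
  | nil => simp [fftGoA, fftCut]
  | cons f rest ih =>
      by_cases hr : r < f
      · simp [fftGoA, fftCut, hr, show ¬ (l ≤ f ∧ f ≤ r) from fun h => absurd h.2 (not_le.mpr hr)]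
      · have hfr : f ≤ r := le_of_not_gt hr
        by_cases hl : l ≤ f
        · simp [fftGoA, fftCut, hr, hl, hfr, PySem.List.enumerate_cons, ih]
        · simp [fftGoA, fftCut, hr, hl, PySem.List.enumerate_cons, ih]

-- ===== VERDICT (by name: the statement is the Claim_ definition above) =====
theorem fft_bucket_spec : Claim_equal_fft_bucket := by
  intro l r xs _
  unfold Spec_fft_bucket fft_bucket fft_bucket_alt
  rw [fftGoA_eq]
  simp [PySem.List.slice_to_natCast]
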